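-- pv_equiv track=rewrite | github.com/portafolioGomezan/gestureRecognition | bloques/featureSelector.py | getSSC
-- ===== SOURCE A (Python) =====
-- def getSSC(signal):
--   """
--   Calculates the number of sign changes in a given signal.
--
--   Parameters:
--   signal (list): The input signal.
--
--   Returns:
--   int: The number of sign changes in the signal.
--   """
--   sign_changes = 0  # contador de cambios de signo
--   prev_sign = 0  # signo previo
--
--   for value in signal:
--     if value < 0:
--       if prev_sign > 0:
--         sign_changes += 1
--       prev_sign = -1
--     elif value > 0:
--       if prev_sign < 0:
--         sign_changes += 1
--       prev_sign = 1
--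
--   return sign_changes
-- ===== SOURCE B (Python) =====
-- def getSSC(sig):
--   signs = [1 if v > 0 else -1 for v in sig if v > 0 or v < 0]
--   return sum(1 for a, b in zip(signs, signs[1:]) if a != b)
-- ===== Notes on version B (the rewrite author's own statement) =====
-- stated objective: simpler
-- what changed: B separates the computation into a sign-compression step (a comprehension dropping zeros and mapping to +/-1) followed by a pairwise zip count of adjacent differences, instead of threading prev_sign and a counter through one stateful loop.
import Mathlib
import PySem

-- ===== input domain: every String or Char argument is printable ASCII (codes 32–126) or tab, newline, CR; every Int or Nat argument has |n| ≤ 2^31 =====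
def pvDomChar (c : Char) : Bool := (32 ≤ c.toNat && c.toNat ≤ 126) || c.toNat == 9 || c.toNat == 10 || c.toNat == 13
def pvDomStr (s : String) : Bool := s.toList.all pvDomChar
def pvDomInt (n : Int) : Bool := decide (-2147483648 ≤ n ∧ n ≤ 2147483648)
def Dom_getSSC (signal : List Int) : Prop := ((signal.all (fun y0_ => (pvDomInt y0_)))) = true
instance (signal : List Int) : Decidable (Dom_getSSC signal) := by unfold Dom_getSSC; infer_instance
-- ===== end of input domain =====

-- B: sign-compression step (drop zeros, map to ±1) then a pairwise zip count of
-- adjacent differences, replacing A's single stateful loop threading prev_sign.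


-- ===== PORT A =====
-- the for-loop over (sign_changes, prev_sign)
def getSSCLoop (state : Int × Int) : List Int → Int × Int
  | [] => state
  | v :: t =>
      let (sign_changes, prev_sign) := state
      if v < 0 then
        getSSCLoop ((if prev_sign > 0 then sign_changes + 1 else sign_changes), -1) t
      else if v > 0 then
        getSSCLoop ((if prev_sign < 0 then sign_changes + 1 else sign_changes), 1) t
      else
        getSSCLoop (sign_changes, prev_sign) t

def getSSC (signal : List Int) : Int := (getSSCLoop (0, 0) signal).1

-- ===== PORT B =====
def getSSCAltSigns (signal : List Int) : List Int :=
  (signal.filter (fun v => decide (v > 0 ∨ v < 0))).map (fun v => if v > 0 then (1 : Int) else -1)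

def getSSC_alt (signal : List Int) : Int :=
  let signs := getSSCAltSigns signal
  (List.zip signs (signs.drop 1)).foldl (fun acc p => if p.1 ≠ p.2 then acc + 1 else acc) 0

-- ===== PRECONDITION & SPEC =====
def Spec_getSSC (signal : List Int) (out : Int) : Prop := out = getSSC_alt signal
instance (signal : List Int) (out : Int) : Decidable (Spec_getSSC signal out) := by unfold Spec_getSSC; infer_instance

-- ===== CLAIM (what is proved, stated in full; the proofs are below) =====
def Claim_equal_getSSC : Prop := ∀ (signal : List Int), Dom_getSSC signal → Spec_getSSC signal (getSSC signal)

-- ===== LEMMAS AND PROOFS =====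

-- adjacent-change count of a sign list
def pvPairs : List Int → Int
  | a :: b :: t => (if a ≠ b then 1 else 0) + pvPairs (b :: t)
  | _ => 0

theorem getSSCAltSigns_cons (v : Int) (t : List Int) :
    getSSCAltSigns (v :: t) =
      (if v > 0 ∨ v < 0 then [if v > 0 then (1 : Int) else -1] else []) ++ getSSCAltSigns t := by
  rcases lt_trichotomy v 0 with h|h|h
  · have h1 : v > 0 ∨ v < 0 := Or.inr h
    have h2 : ¬ (0 < v) := by omega
    have h3 : ¬ (0 = v) := by omega
    simp [getSSCAltSigns, List.filter_cons, h, h1, h2, h3]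
  · subst h; simp [getSSCAltSigns, List.filter_cons]
  · have h1 : v > 0 ∨ v < 0 := Or.inl h
    have h3 : ¬ (0 = v) := by omega
    simp [getSSCAltSigns, List.filter_cons, h, h1, h3]

-- A's loop from state (c, p) computes c + adjacent changes of (p prepended when p ≠ 0)
theorem loop_eq (signal : List Int) : ∀ (c p : Int), (p = 0 ∨ p = 1 ∨ p = -1) →
    (getSSCLoop (c, p) signal).1 =
      c + pvPairs (if p = 0 then getSSCAltSigns signal else p :: getSSCAltSigns signal) := by
  induction signal with
  | nil => intro c p hp; simp [getSSCLoop, getSSCAltSigns]; rcases hp with h|h|h <;> simp [h, pvPairs]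
  | cons v t ih =>
    intro c p hp
    by_cases hneg : v < 0
    · have hx := getSSCAltSigns_cons v t
      have hv : (v > 0 ∨ v < 0) := Or.inr hneg
      have hv1 : ¬ v > 0 := by omega
      rw [if_pos hv, if_neg hv1] at hx
      simp only [getSSCLoop]
      rw [if_pos hneg, ih _ (-1) (Or.inr (Or.inr rfl))]
      rcases hp with h|h|h <;>
        simp only [h, hx, List.singleton_append] <;> simp [pvPairs] <;> omega
    · by_cases hpos : v > 0
      · have hx := getSSCAltSigns_cons v t
        have hv : (v > 0 ∨ v < 0) := Or.inl hpos
        rw [if_pos hv, if_pos hpos] at hx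
        simp only [getSSCLoop]
        rw [if_neg hneg, if_pos hpos, ih _ 1 (Or.inr (Or.inl rfl))]
        rcases hp with h|h|h <;>
          simp only [h, hx, List.singleton_append] <;> simp [pvPairs] <;> omega
      · have hz : ¬ (v > 0 ∨ v < 0) := by omega
        have hx := getSSCAltSigns_cons v t
        rw [if_neg hz] at hx
        simp only [getSSCLoop]
        rw [if_neg hneg, if_neg hpos, ih c p hp, hx, List.nil_append]

-- B's zip-fold computes c + pvPairs
theorem fold_eq (ss : List Int) : ∀ (c : Int),
    (List.zip ss (ss.drop 1)).foldl (fun acc p => if p.1 ≠ p.2 then acc + 1 else acc) c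
      = c + pvPairs ss := by
  induction ss with
  | nil => intro c; simp [pvPairs]
  | cons a t ih =>
    intro c
    cases t with
    | nil => simp [pvPairs]
    | cons b u =>
      simp only [List.drop_succ_cons, List.drop_zero] at ih
      simp only [List.drop_succ_cons, List.drop_zero, List.zip_cons_cons, List.foldl_cons]
      rw [ih]
      simp only [pvPairs]
      split_ifs <;> omega

-- ===== VERDICT (by name: the statement is the Claim_ definition above) =====
theorem getSSC_spec : Claim_equal_getSSC := by
  intro signal _
  unfold Spec_getSSC getSSC getSSC_alt
  rw [loop_eq signal 0 0 (Or.inl rfl), fold_eq]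
  simp
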